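-- pv_equiv track=rewrite | github.com/Zenz1llo/Bater-a-ejercicios.py1 | ejercicio9.py | superposicion
-- ===== SOURCE A (Python) =====
-- def superposicion(lista1, lista2):
--     flag = False
--     i = 0
--     j = 0
--     rango_1 = range(len(lista1))
--     for n_1 in rango_1:
--         elemento_1 = lista1[n_1]
--         rango_2 = range(n_1, len(lista1))
--         for n_2 in rango_2:
--             elemento_2 = lista2[n_2]
--             if elemento_1 == elemento_2:
--                 flag = True
--     return flag
-- ===== SOURCE B (Python) =====
-- def superposicion(lista1, lista2):
--     vistos = set()
--     for x, y in zip(lista1, lista2):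
--         vistos.add(x)
--         if y in vistos:
--             return True
--     return False
-- ===== Notes on version B (the rewrite author's own statement) =====
-- stated objective: faster
-- what changed: Replaced the nested index loops (for each i, scan lista2[i..len1) for a match) by a single pass over zip(lista1, lista2) that maintains a set of the lista1-prefix values and tests lista2[j] membership, with early return on the first hit.
import Mathlib
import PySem

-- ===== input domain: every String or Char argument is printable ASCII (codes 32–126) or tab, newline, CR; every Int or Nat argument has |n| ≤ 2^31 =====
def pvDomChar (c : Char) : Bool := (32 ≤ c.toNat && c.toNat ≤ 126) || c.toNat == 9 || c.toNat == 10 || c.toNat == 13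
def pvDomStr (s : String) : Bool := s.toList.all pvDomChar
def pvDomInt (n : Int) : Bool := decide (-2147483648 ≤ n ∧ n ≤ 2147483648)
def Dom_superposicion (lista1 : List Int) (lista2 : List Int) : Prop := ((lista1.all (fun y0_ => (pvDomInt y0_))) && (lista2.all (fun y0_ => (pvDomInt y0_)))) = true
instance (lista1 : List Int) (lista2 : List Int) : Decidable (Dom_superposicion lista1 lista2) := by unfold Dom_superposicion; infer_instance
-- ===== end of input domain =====

-- B replaces A's nested O(n^2) index scan by a single pass over zip(lista1, lista2) keeping a set of
-- the lista1-prefix values (objective: faster, asymptotic).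

-- ===== PORT A =====
-- Literal transliteration of A; lista1[n_1] and lista2[n_2] are pyGetD (exact under Pre_, which
-- excludes the inputs where Python's lista2[n_2] raises IndexError).
def superposicion (lista1 : List Int) (lista2 : List Int) : Bool :=
  (PySem.List.pyRange 0 (lista1.length : Int) 1).foldl (fun flag n1 =>
    let elemento1 := PySem.List.pyGetD lista1 n1 0
    (PySem.List.pyRange n1 (lista1.length : Int) 1).foldl (fun fl n2 =>
      let elemento2 := PySem.List.pyGetD lista2 n2 0
      if elemento1 == elemento2 then true else fl) flag) false

-- ===== PORT B =====
-- the loop body of Source B: early return = the if, set 'vistos' threaded through the recursion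
def altGo (zs : List (Int × Int)) (vistos : PySem.Set Int) : Bool :=
  match zs with
  | [] => false
  | (x, y) :: rest =>
    let vistos' := PySem.Set.add vistos x
    if PySem.Set.contains vistos' y then true else altGo rest vistos'

def superposicion_alt (lista1 : List Int) (lista2 : List Int) : Bool :=
  altGo (lista1.zip lista2) PySem.Set.empty

-- ===== PRECONDITION & SPEC =====
-- Pre_ excludes exactly the inputs where A raises IndexError (lista2 shorter than lista1).
def Pre_superposicion (lista1 : List Int) (lista2 : List Int) : Prop :=
  lista1.length ≤ lista2.length
instance (lista1 : List Int) (lista2 : List Int) : Decidable (Pre_superposicion lista1 lista2) := by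
  unfold Pre_superposicion; infer_instance

def pvWitness_superposicion : List Int × List Int := ([1, 2], [3, 1])

def Spec_superposicion (lista1 : List Int) (lista2 : List Int) (out : Bool) : Prop :=
  out = superposicion_alt lista1 lista2
instance (lista1 : List Int) (lista2 : List Int) (out : Bool) : Decidable (Spec_superposicion lista1 lista2 out) := by
  unfold Spec_superposicion; infer_instance

-- ===== CLAIM (what is proved, stated in full; the proofs are below) =====
def Claim_equal_superposicion : Prop := ∀ (lista1 : List Int) (lista2 : List Int), Dom_superposicion lista1 lista2 → Pre_superposicion lista1 lista2 → Spec_superposicion lista1 lista2 (superposicion lista1 lista2)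


-- ===== LEMMAS AND PROOFS =====

-- both programs decide this proposition (i ≤ j, both below len(lista1))
def pvOverlap (lista1 lista2 : List Int) : Prop :=
  ∃ j, j < lista1.length ∧ ∃ i, i ≤ j ∧ lista1.getD i 0 = lista2.getD j 0

theorem pv_pyGetD_nonneg (xs : List Int) (i : Int) (d : Int) (h : 0 ≤ i) :
    PySem.List.pyGetD xs i d = xs.getD i.toNat d := by
  have h2 := PySem.List.pyGetD_natCast (xs := xs) (n := i.toNat) (d := d)
  rwa [Int.toNat_of_nonneg h] at h2

theorem pv_mem_add (s : PySem.Set Int) (x v : Int) :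
    v ∈ PySem.Set.add s x ↔ v ∈ s ∨ v = x := by
  simp [pysem]

theorem pv_contains_add (s : PySem.Set Int) (x y : Int) :
    PySem.Set.contains (PySem.Set.add s x) y = true ↔ y ∈ s ∨ y = x := by
  simp [pysem]

theorem pv_zip_getD (l1 l2 : List Int) (k : Nat) (h1 : k < l1.length) (h2 : k < l2.length) :
    (l1.zip l2).getD k (0, 0) = (l1.getD k 0, l2.getD k 0) := by
  rw [List.getD_eq_getElem _ _ (by rw [List.length_zip]; omega), List.getElem_zip,
    List.getD_eq_getElem _ _ h1, List.getD_eq_getElem _ _ h2]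

theorem pv_foldl2 (f : Int → Int → Bool) (outer : List Int) (inner : Int → List Int) (b : Bool) :
    outer.foldl (fun flag n1 => (inner n1).foldl (fun fl n2 => if f n1 n2 then true else fl) flag) b
      = (b || outer.any (fun n1 => (inner n1).any (f n1))) := by
  induction outer generalizing b with
  | nil => simp
  | cons x xs ih =>
    rw [List.foldl_cons, ih, PySem.List.foldl_if_true_eq]
    simp [Bool.or_assoc]

theorem pv_A_iff (l1 l2 : List Int) : superposicion l1 l2 = true ↔ pvOverlap l1 l2 := by
  unfold superposicion pvOverlap
  rw [pv_foldl2 (fun n1 n2 => PySem.List.pyGetD l1 n1 0 == PySem.List.pyGetD l2 n2 0)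
    (PySem.List.pyRange 0 (l1.length : Int) 1) (fun n1 => PySem.List.pyRange n1 (l1.length : Int) 1) false]
  simp only [Bool.false_or, List.any_eq_true, PySem.List.mem_pyRange_one, beq_iff_eq]
  constructor
  · rintro ⟨n1, ⟨h0, h1⟩, n2, ⟨h2, h3⟩, he⟩
    refine ⟨n2.toNat, by omega, n1.toNat, by omega, ?_⟩
    rwa [pv_pyGetD_nonneg _ _ _ h0, pv_pyGetD_nonneg _ _ _ (le_trans h0 h2)] at he
  · rintro ⟨j, hj, i, hij, he⟩
    refine ⟨(i : Int), ⟨by omega, by omega⟩, (j : Int), ⟨by omega, by omega⟩, ?_⟩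
    simpa using he

theorem pv_altGo_cons_true (rest : List (Int × Int)) (s : PySem.Set Int) (x y : Int)
    (h : PySem.Set.contains (PySem.Set.add s x) y = true) :
    altGo ((x, y) :: rest) s = true := by
  simp only [altGo]
  rw [if_pos h]

theorem pv_altGo_cons_false (rest : List (Int × Int)) (s : PySem.Set Int) (x y : Int)
    (h : ¬ PySem.Set.contains (PySem.Set.add s x) y = true) :
    altGo ((x, y) :: rest) s = altGo rest (PySem.Set.add s x) := by
  simp only [altGo]
  rw [if_neg h]

theorem pv_altGo_iff (zs : List (Int × Int)) (s : PySem.Set Int) :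
    altGo zs s = true ↔
      ∃ k, k < zs.length ∧ ((zs.getD k (0, 0)).2 ∈ s ∨
        ∃ i, i ≤ k ∧ (zs.getD i (0, 0)).1 = (zs.getD k (0, 0)).2) := by
  induction zs generalizing s with
  | nil => simp [altGo]
  | cons p rest ih =>
    obtain ⟨x, y⟩ := p
    by_cases hc : PySem.Set.contains (PySem.Set.add s x) y = true
    · rw [pv_altGo_cons_true rest s x y hc]
      refine ⟨fun _ => ⟨0, by simp, ?_⟩, fun _ => rfl⟩
      simp only [List.getD_cons_zero]
      rcases (pv_contains_add s x y).mp hc with h | h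
      · exact Or.inl h
      · exact Or.inr ⟨0, Nat.le_refl 0, h.symm⟩
    · rw [pv_altGo_cons_false rest s x y hc, ih]
      have hy : ¬ (y ∈ s ∨ y = x) := fun h => hc ((pv_contains_add s x y).mpr h)
      constructor
      · rintro ⟨k, hk, hcase⟩
        refine ⟨k + 1, by simp only [List.length_cons]; omega, ?_⟩
        simp only [List.getD_cons_succ]
        rcases hcase with hmem | ⟨i, hik, he⟩
        · rcases (pv_mem_add s x _).mp hmem with h | h
          · exact Or.inl h
          · exact Or.inr ⟨0, by omega, by simpa using h.symm⟩
        · exact Or.inr ⟨i + 1, by omega, by simpa using he⟩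
      · rintro ⟨k, hk, hcase⟩
        cases k with
        | zero =>
          exfalso
          simp only [List.getD_cons_zero] at hcase
          rcases hcase with hmem | ⟨i, hi0, he⟩
          · exact hy (Or.inl hmem)
          · have hi : i = 0 := Nat.le_zero.mp hi0
            subst hi
            simp only [List.getD_cons_zero] at he
            exact hy (Or.inr he.symm)
        | succ k =>
          refine ⟨k, by simp only [List.length_cons] at hk; omega, ?_⟩
          simp only [List.getD_cons_succ] at hcase
          rcases hcase with hmem | ⟨i, hik, he⟩
          · exact Or.inl ((pv_mem_add s x _).mpr (Or.inl hmem))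
          · cases i with
            | zero =>
              simp only [List.getD_cons_zero] at he
              exact Or.inl ((pv_mem_add s x _).mpr (Or.inr he.symm))
            | succ i =>
              simp only [List.getD_cons_succ] at he
              exact Or.inr ⟨i, by omega, he⟩

theorem pv_B_iff (l1 l2 : List Int) (h : l1.length ≤ l2.length) :
    superposicion_alt l1 l2 = true ↔ pvOverlap l1 l2 := by
  unfold superposicion_alt pvOverlap
  rw [pv_altGo_iff]
  constructor
  · rintro ⟨k, hk, hcase⟩
    rw [List.length_zip] at hk
    have hk1 : k < l1.length := by omega
    have hk2 : k < l2.length := by omega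
    rcases hcase with hmem | ⟨i, hik, he⟩
    · simp [PySem.Set.empty] at hmem
    · have hi1 : i < l1.length := by omega
      have hi2 : i < l2.length := by omega
      rw [pv_zip_getD l1 l2 k hk1 hk2, pv_zip_getD l1 l2 i hi1 hi2] at he
      exact ⟨k, hk1, i, hik, he⟩
  · rintro ⟨j, hj, i, hij, he⟩
    have hj2 : j < l2.length := by omega
    have hi1 : i < l1.length := by omega
    have hi2 : i < l2.length := by omega
    refine ⟨j, by rw [List.length_zip]; omega, Or.inr ⟨i, hij, ?_⟩⟩
    rw [pv_zip_getD l1 l2 j hj hj2, pv_zip_getD l1 l2 i hi1 hi2]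
    exact he

-- ===== VERDICT (by name: the statement is the Claim_ definition above) =====
theorem superposicion_spec : Claim_equal_superposicion := by
  intro l1 l2 _ hpre
  unfold Spec_superposicion
  rw [Bool.eq_iff_iff, pv_A_iff, pv_B_iff l1 l2 hpre]
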